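-- pv_equiv track=rewrite | github.com/khloe1425/luyenthihsgioi | THCS/2022_2023/NgheAn_Vinh_2223/Bai3/MINPLACES.py | min_parking_spaces
-- ===== SOURCE A (Python) =====
-- def min_parking_spaces(arrival, departure):
--     # Sắp xếp thời gian đến và thời gian rời bến
--     arrival.sort()
--     departure.sort()
--
--     # Biến đếm số chỗ đỗ xe hiện tại và tối đa
--     spaces_needed = 0
--     max_spaces = 0
--
--     # Chỉ số cho thời gian đến và đi
--     i, j = 0, 0
--     n = len(arrival)
--
--     # Duyệt qua tất cả các xe
--     while i < n and j < n:
--         if arrival[i] < departure[j]: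
--             # Nếu có xe đến trước khi xe rời đi, tăng số chỗ đỗ cần thiết
--             spaces_needed += 1
--             max_spaces = max(max_spaces, spaces_needed)
--             i += 1
--         else:
--             # Nếu có xe rời đi, giảm số chỗ đỗ cần thiết
--             spaces_needed -= 1
--             j += 1
--
--     return max_spaces
-- ===== SOURCE B (Python) =====
-- # Counting re-implementation: spaces needed at arrival time t = (#arrivals <= t) - (#departures <= t)
-- # (a departure at time t frees its spot first, matching A's tie-break); answer = max over arrival
-- # times, floored at 0.  Ranks come from sorted copies via binary search.
-- # Return-value equivalence only: A sorts its arguments in place, B does not mutate them.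
-- def min_parking_spaces(arrival, departure):
--     arr = sorted(arrival)
--     dep = sorted(departure)
--
--     def rank(lst, t):
--         # number of elements of sorted lst that are <= t (binary search)
--         lo, hi = 0, len(lst)
--         while lo < hi:
--             mid = (lo + hi) // 2
--             if lst[mid] <= t:
--                 lo = mid + 1
--             else:
--                 hi = mid
--         return lo
--
--     best = 0
--     for t in arrival:
--         cur = rank(arr, t) - rank(dep, t)
--         if cur > best:
--             best = cur
--     return best
-- ===== Notes on version B (the rewrite author's own statement) =====
-- stated objective: alternative
-- what changed: Replaced the in-place sort + two-pointer merge sweep by a counting formulation: for each arrival time t the load is (#arrivals <= t) - (#departures <= t), computed from sorted copies by a hand-written binary-search rank, and the answer is the maximum of these floored at 0; B does not reproduce A's in-place sorting of its arguments (equivalence is about the return value).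
import Mathlib
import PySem

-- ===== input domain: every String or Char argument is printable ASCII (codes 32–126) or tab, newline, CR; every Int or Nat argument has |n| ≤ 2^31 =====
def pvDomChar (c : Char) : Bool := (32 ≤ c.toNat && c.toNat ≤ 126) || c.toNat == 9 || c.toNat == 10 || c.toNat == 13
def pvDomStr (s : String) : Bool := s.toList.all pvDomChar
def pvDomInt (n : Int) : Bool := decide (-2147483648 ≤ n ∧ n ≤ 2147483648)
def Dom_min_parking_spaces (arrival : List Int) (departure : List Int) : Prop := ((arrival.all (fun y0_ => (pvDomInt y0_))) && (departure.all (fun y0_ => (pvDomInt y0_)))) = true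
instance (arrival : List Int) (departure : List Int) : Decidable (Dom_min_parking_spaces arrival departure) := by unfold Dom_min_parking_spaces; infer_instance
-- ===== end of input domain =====

-- B replaces A's in-place-sort + two-pointer sweep by a counting maximum over arrival times
-- with binary-search ranks (alternative decomposition, not faster); equivalence is about the
-- RETURN value only: A sorts both argument lists in place, B does not mutate them.


-- ===== PORT A =====
-- the while loop: i, j indices, n = len(arrival); departure[j] can be out of range
-- (IndexError in Python, pyGet? = none) — the port returns the current max there,
-- and exactly those inputs are excluded by Pre_.
def minParkingLoop (a d : List Int) (n i j : Nat) (sp mx : Int) : Int :=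
  if _h : i < n ∧ j < n then
    match PySem.List.pyGet? a (i : Int), PySem.List.pyGet? d (j : Int) with
    | some ai, some dj =>
        if ai < dj then minParkingLoop a d n (i + 1) j (sp + 1) (max mx (sp + 1))
        else minParkingLoop a d n i (j + 1) (sp - 1) mx
    | _, _ => mx
  else mx
termination_by (n - i) + (n - j)
decreasing_by all_goals omega

def min_parking_spaces (arrival : List Int) (departure : List Int) : Int :=
  let a := PySem.List.sorted arrival (fun x => x) false
  let d := PySem.List.sorted departure (fun x => x) false
  minParkingLoop a d a.length 0 0 0 0

-- ===== PORT B =====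
-- B-side helper: the hand-written binary search `rank` of Source B (lst[mid] is always in
-- range in B's calls; the `none` branch is unreachable there)
def rankLoop (lst : List Int) (t : Int) (lo hi : Nat) : Nat :=
  if _h : lo < hi then
    let mid := (lo + hi) / 2
    match PySem.List.pyGet? lst (mid : Int) with
    | some v => if v ≤ t then rankLoop lst t (mid + 1) hi else rankLoop lst t lo mid
    | none => lo
  else lo
termination_by hi - lo
decreasing_by all_goals omega

def rank (lst : List Int) (t : Int) : Nat := rankLoop lst t 0 lst.length

def min_parking_spaces_alt (arrival : List Int) (departure : List Int) : Int :=
  let arr := PySem.List.sorted arrival (fun x => x) false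
  let dep := PySem.List.sorted departure (fun x => x) false
  arrival.foldl (fun best t =>
    let cur : Int := (rank arr t : Int) - (rank dep t : Int)
    if cur > best then cur else best) 0

-- ===== PRECONDITION & SPEC =====
-- Pre_ excludes exactly the inputs on which A raises IndexError: departure shorter than
-- arrival while some arrival time is ≥ every departure time (A's loop bounds BOTH indices
-- by len(arrival), so the departure index runs off the end there).
def Pre_min_parking_spaces (arrival : List Int) (departure : List Int) : Prop :=
  arrival.length ≤ departure.length ∨ ∃ y ∈ departure, ∀ x ∈ arrival, x < y
instance (arrival : List Int) (departure : List Int) : Decidable (Pre_min_parking_spaces arrival departure) := by unfold Pre_min_parking_spaces; infer_instance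
def pvWitness_min_parking_spaces : List Int × List Int := ([3, 1, 2], [4, 2, 5])

def Spec_min_parking_spaces (arrival : List Int) (departure : List Int) (out : Int) : Prop := out = min_parking_spaces_alt arrival departure
instance (arrival : List Int) (departure : List Int) (out : Int) : Decidable (Spec_min_parking_spaces arrival departure out) := by unfold Spec_min_parking_spaces; infer_instance

-- ===== CLAIM (what is proved, stated in full; the proofs are below) =====
def Claim_equal_min_parking_spaces : Prop := ∀ (arrival : List Int) (departure : List Int), Dom_min_parking_spaces arrival departure → Pre_min_parking_spaces arrival departure → Spec_min_parking_spaces arrival departure (min_parking_spaces arrival departure)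

-- ===== LEMMAS AND PROOFS =====

-- A's loop rephrased on the list remainders: 1st arg = arrival[i:], 2nd = departure[j:],
-- 3rd = n - j (A bounds BOTH indices by n = len(arrival)); the `_ :: _, [], _+1` case is
-- where Python raises IndexError (the port's `none` branch, returning mx).
def listA : List Int → List Int → Nat → Int → Int → Int
  | [], _, _, _, mx => mx
  | _ :: _, _, 0, _, mx => mx
  | _ :: _, [], _ + 1, _, mx => mx
  | x :: a', y :: d', jb + 1, sp, mx =>
      if x < y then listA a' (y :: d') (jb + 1) (sp + 1) (max mx (sp + 1))
      else listA (x :: a') d' jb (sp - 1) mx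
termination_by a d jb _ _ => a.length + d.length + jb

-- relative balances recorded after each arrival event of the full departure-first merge
def offs : List Int → List Int → List Int
  | [], _ => []
  | _ :: a', [] => 1 :: (offs a' []).map (· + 1)
  | x :: a', y :: d' =>
      if x < y then 1 :: (offs a' (y :: d')).map (· + 1)
      else (offs (x :: a') d').map (· - 1)
termination_by a d => a.length + d.length

def cnt (l : List Int) (t : Int) : Int := l.countP (fun z => decide (z ≤ t))

theorem cnt_nil (t : Int) : cnt [] t = 0 := rfl

theorem cnt_cons_le {x t : Int} (l : List Int) (h : x ≤ t) :
    cnt (x :: l) t = cnt l t + 1 := by simp [cnt, h]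

theorem cnt_eq_zero {t : Int} (l : List Int) (h : ∀ z ∈ l, t < z) : cnt l t = 0 := by
  simp only [cnt]
  rw [List.countP_eq_zero.mpr]
  · rfl
  · intro z hz; simpa using (h z hz).not_ge

theorem cnt_nonneg (l : List Int) (t : Int) : 0 ≤ cnt l t := by unfold cnt; exact Int.natCast_nonneg _

theorem countP_boundary (l : List Int) (t : Int) (lo : Nat) (hlen : lo ≤ l.length)
    (hlo : ∀ i (h : i < l.length), i < lo → l[i] ≤ t)
    (hhi : ∀ i (h : i < l.length), lo ≤ i → t < l[i]) :
    l.countP (fun z => decide (z ≤ t)) = lo := by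
  conv_lhs => rw [← List.take_append_drop lo l]
  rw [List.countP_append]
  have h1 : (l.take lo).countP (fun z => decide (z ≤ t)) = lo := by
    rw [List.countP_eq_length.mpr, List.length_take_of_le hlen]
    intro z hz
    rcases List.mem_iff_getElem.mp hz with ⟨i, hi, rfl⟩
    have hil : i < l.length := by
      have := List.length_take_of_le hlen ▸ hi; omega
    rw [List.getElem_take]
    have hilo : i < lo := by have := List.length_take_of_le hlen ▸ hi; omega
    simpa using hlo i hil hilo
  have h2 : (l.drop lo).countP (fun z => decide (z ≤ t)) = 0 := by
    rw [List.countP_eq_zero]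
    intro z hz
    rcases List.mem_iff_getElem.mp hz with ⟨i, hi, rfl⟩
    rw [List.getElem_drop]
    have hil : lo + i < l.length := by
      have := List.length_drop (i := lo) (l := l) ▸ hi; omega
    simpa using (hhi (lo + i) hil (by omega)).not_ge
  omega

theorem rankLoop_eq (l : List Int) (t : Int) (hs : l.Pairwise (· ≤ ·)) (lo hi : Nat) :
    lo ≤ hi → hi ≤ l.length →
    (∀ i (h : i < l.length), i < lo → l[i] ≤ t) →
    (∀ i (h : i < l.length), hi ≤ i → t < l[i]) →
    (rankLoop l t lo hi : Int) = cnt l t := by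
  have hmono : ∀ (i j : Nat) (hij : i ≤ j) (hj : j < l.length), l[i]'(by omega) ≤ l[j] := by
    intro i j hij hj
    rcases Nat.eq_or_lt_of_le hij with rfl | hlt
    · exact le_refl _
    · exact List.pairwise_iff_getElem.mp hs i j (by omega) hj hlt
  fun_induction rankLoop l t lo hi with
  | case1 lo hi h mid v hv hvt ih =>
      intro hlohi hhil hlo hhi
      rw [PySem.List.pyGet?_natCast] at hv
      rcases List.getElem?_eq_some_iff.mp hv with ⟨hmid, he⟩
      apply ih (by omega) hhil
      · intro i hil hi'
        exact le_trans (hmono i mid (by omega) hmid) (he ▸ hvt)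
      · exact hhi
  | case2 lo hi h mid v hv hvt ih =>
      intro hlohi hhil hlo hhi
      rw [PySem.List.pyGet?_natCast] at hv
      rcases List.getElem?_eq_some_iff.mp hv with ⟨hmid, he⟩
      apply ih (by omega) (by omega) hlo
      · intro i hil hi'
        exact lt_of_lt_of_le (by rw [he]; omega) (hmono mid i hi' hil)
  | case3 lo hi h mid hnone =>
      intro hlohi hhil hlo hhi
      exfalso
      rw [PySem.List.pyGet?_natCast] at hnone
      have : (lo + hi) / 2 < l.length := by omega
      rw [List.getElem?_eq_getElem this] at hnone
      simp at hnone
  | case4 lo hi h =>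
      intro hlohi hhil hlo hhi
      have hlohi' : lo = hi ∨ hi < lo := by omega
      have : lo ≤ l.length := by omega
      unfold cnt
      rw [countP_boundary l t lo this hlo]
      intro i hil hi'
      exact hhi i hil (by omega)

theorem rank_eq (l : List Int) (t : Int) (hs : l.Pairwise (· ≤ ·)) :
    (rank l t : Int) = cnt l t := by
  apply rankLoop_eq l t hs 0 l.length (by omega) le_rfl
  · intro i _ hi; omega
  · intro i hil hi; omega

theorem offs_le (a d : List Int) : ∀ o ∈ offs a d, o ≤ (a.length : Int) := by
  fun_induction offs a d with
  | case1 d => simp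
  | case2 x a' ih =>
      intro o ho
      simp only [List.mem_cons, List.mem_map] at ho
      rcases ho with rfl | ⟨o', ho', rfl⟩
      · simp
      · have := ih o' ho'; simp; omega
  | case3 x a' y d' hxy ih =>
      intro o ho
      simp only [List.mem_cons, List.mem_map] at ho
      rcases ho with rfl | ⟨o', ho', rfl⟩
      · simp
      · have := ih o' ho'; simp; omega
  | case4 x a' y d' hxy ih =>
      intro o ho
      simp only [List.mem_map] at ho
      rcases ho with ⟨o', ho', rfl⟩
      have := ih o' ho'; simp at this ⊢; omega

theorem foldl_max_const {f : Int → Int} (L : List Int) (c : Int)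
    (h : ∀ x ∈ L, f x ≤ c) : L.foldl (fun m o => max m (f o)) c = c := by
  induction L with
  | nil => rfl
  | cons x t ih =>
      simp only [List.foldl_cons]
      have hx : f x ≤ c := h x (by simp)
      rw [max_eq_left hx]
      exact ih (fun y hy => h y (by simp [hy]))

theorem foldl_max_eq (L₁ L₂ : List Int) (c : Int)
    (h12 : ∀ x ∈ L₁, ∃ y ∈ L₂, x ≤ y) (h21 : ∀ y ∈ L₂, ∃ x ∈ L₁, y ≤ x) :
    L₁.foldl max c = L₂.foldl max c := by
  apply le_antisymm
  · rcases PySem.List.foldl_max_mem L₁ c with h | h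
    · rw [h]; exact (PySem.List.le_foldl_max L₂ c).1
    · rcases h12 _ h with ⟨y, hy, hxy⟩
      exact le_trans hxy ((PySem.List.le_foldl_max L₂ c).2 y hy)
  · rcases PySem.List.foldl_max_mem L₂ c with h | h
    · rw [h]; exact (PySem.List.le_foldl_max L₁ c).1
    · rcases h21 _ h with ⟨x, hx, hyx⟩
      exact le_trans hyx ((PySem.List.le_foldl_max L₁ c).2 x hx)

theorem listA_eq_offs (a d : List Int) (jb : Nat) (sp mx : Int)
    (h1 : 0 ≤ mx) (h2 : sp + a.length ≤ mx + jb)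
    (h3 : jb ≤ d.length ∨ ∃ y ∈ d, ∀ x ∈ a, x < y) :
    listA a d jb sp mx = (offs a d).foldl (fun m o => max m (sp + o)) mx := by
  fun_induction listA a d jb sp mx with
  | case1 d jb sp mx => simp [offs]
  | case2 x a' d sp mx =>
      refine (foldl_max_const (f := fun o => sp + o) _ _ ?_).symm
      intro o ho
      have := offs_le (x :: a') d o ho
      simp only [List.length_cons] at h2 this
      push_cast at h2 this ⊢
      omega
  | case3 x a' jb sp mx =>
      rcases h3 with h | ⟨y, hy, _⟩
      · simp at h
      · simp at hy
  | case4 x a' y d' jb sp mx hxy ih =>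
      have step : offs (x :: a') (y :: d') = 1 :: (offs a' (y :: d')).map (· + 1) := by
        rw [offs, if_pos hxy]
      rw [step]
      simp only [List.foldl_cons, List.foldl_map]
      have hfun : (fun (m o : Int) => max m (sp + (o + 1))) = (fun m o => max m (sp + 1 + o)) := by
        funext m o; ring_nf
      rw [hfun]
      exact ih (le_trans h1 (le_max_left _ _))
        (by simp only [List.length_cons] at h2 ⊢; push_cast at h2 ⊢; omega)
        (by rcases h3 with h | ⟨z, hz, hlt⟩
            · exact Or.inl h
            · exact Or.inr ⟨z, hz, fun w hw => hlt w (by simp [hw])⟩)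
  | case5 x a' y d' jb sp mx hxy ih =>
      have step : offs (x :: a') (y :: d') = (offs (x :: a') d').map (· - 1) := by
        rw [offs, if_neg hxy]
      rw [step]
      simp only [List.foldl_map]
      have hfun : (fun (m o : Int) => max m (sp + (o - 1))) = (fun m o => max m (sp - 1 + o)) := by
        funext m o; ring_nf
      rw [hfun]
      exact ih h1
        (by simp only [List.length_cons] at h2 ⊢; push_cast at h2 ⊢; omega)
        (by rcases h3 with h | ⟨z, hz, hlt⟩
            · left; simp only [List.length_cons] at h; omega
            · rcases List.mem_cons.mp hz with rfl | hz'
              · exact absurd (hlt x (by simp)) hxy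
              · exact Or.inr ⟨z, hz', hlt⟩)

theorem drop_cons_of_get (l : List Int) (k : Nat) (v : Int)
    (hv : l[k]? = some v) : k < l.length ∧ l.drop k = v :: l.drop (k + 1) := by
  rcases List.getElem?_eq_some_iff.mp hv with ⟨hk, he⟩
  exact ⟨hk, by rw [← he]; exact (List.getElem_cons_drop hk).symm⟩

theorem loop_eq_listA (a d : List Int) (i j : Nat) (sp mx : Int) :
    minParkingLoop a d a.length i j sp mx
      = listA (a.drop i) (d.drop j) (a.length - j) sp mx := by
  fun_induction minParkingLoop a d a.length i j sp mx with
  | case1 i j sp mx h ai dj hgd hga hlt ih =>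
      rw [PySem.List.pyGet?_natCast] at hga hgd
      rcases drop_cons_of_get a i ai hga with ⟨hia, hdropa⟩
      rcases drop_cons_of_get d j dj hgd with ⟨hjd, hdropd⟩
      have hja : a.length - j = (a.length - j - 1) + 1 := by omega
      rw [ih, hdropa, hdropd, hja]
      conv_rhs => rw [listA]
      rw [if_pos hlt]
  | case2 i j sp mx h ai dj hgd hga hlt ih =>
      rw [PySem.List.pyGet?_natCast] at hga hgd
      rcases drop_cons_of_get a i ai hga with ⟨hia, hdropa⟩
      rcases drop_cons_of_get d j dj hgd with ⟨hjd, hdropd⟩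
      have hja : a.length - j = (a.length - j - 1) + 1 := by omega
      have hjb : a.length - (j + 1) = a.length - j - 1 := by omega
      rw [ih, hdropa, hdropd, hja, hjb]
      conv_rhs => rw [listA]
      rw [if_neg hlt]
  | case3 i j sp mx h hnone =>
      simp only [PySem.List.pyGet?_natCast] at hnone
      have hia : i < a.length := h.1
      have hga : a[i]? = some a[i] := List.getElem?_eq_getElem hia
      have hgd : d[j]? = none := by
        rcases hd : d[j]? with _ | v
        · rfl
        · exact absurd hd (by intro hdd; exact hnone a[i] v hga hdd)
      have hjd : d.length ≤ j := by
        by_contra hc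
        rw [List.getElem?_eq_getElem (by omega)] at hgd
        simp at hgd
      rcases drop_cons_of_get a i a[i] hga with ⟨_, hdropa⟩
      have hdropd : d.drop j = [] := List.drop_eq_nil_of_le hjd
      have hja : a.length - j = (a.length - j - 1) + 1 := by omega
      rw [hdropa, hdropd, hja, listA]
  | case4 i j sp mx h =>
      rcases Nat.lt_or_ge i a.length with hia | hia
      · have hj0 : a.length - j = 0 := by omega
        have hga : a[i]? = some a[i] := List.getElem?_eq_getElem hia
        rcases drop_cons_of_get a i a[i] hga with ⟨_, hdropa⟩
        rw [hj0, hdropa, listA]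
      · rw [List.drop_eq_nil_of_le hia, listA]

theorem offs_upper (a d : List Int) (ha : a.Pairwise (· ≤ ·)) (hd : d.Pairwise (· ≤ ·)) :
    ∀ o ∈ offs a d, ∃ t ∈ a, o ≤ cnt a t - cnt d t := by
  fun_induction offs a d with
  | case1 d => simp
  | case2 x a' ih =>
      intro o ho
      rcases List.pairwise_cons.mp ha with ⟨hxle, ha'⟩
      simp only [List.mem_cons, List.mem_map] at ho
      rcases ho with rfl | ⟨o', ho', rfl⟩
      · exact ⟨x, List.mem_cons_self, by rw [cnt_cons_le a' le_rfl, cnt_nil]; have := cnt_nonneg a' x; omega⟩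
      · rcases ih ha' List.Pairwise.nil o' ho' with ⟨t, ht, hle⟩
        refine ⟨t, List.mem_cons_of_mem _ ht, ?_⟩
        rw [cnt_cons_le a' (hxle t ht)]
        rw [cnt_nil] at hle ⊢
        omega
  | case3 x a' y d' hxy ih =>
      intro o ho
      rcases List.pairwise_cons.mp ha with ⟨hxle, ha'⟩
      rcases List.pairwise_cons.mp hd with ⟨hyle, _⟩
      simp only [List.mem_cons, List.mem_map] at ho
      rcases ho with rfl | ⟨o', ho', rfl⟩
      · refine ⟨x, List.mem_cons_self, ?_⟩
        have hcd : cnt (y :: d') x = 0 := by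
          apply cnt_eq_zero
          intro z hz
          rcases List.mem_cons.mp hz with rfl | hz'
          · exact hxy
          · exact lt_of_lt_of_le hxy (hyle z hz')
        rw [hcd, cnt_cons_le a' le_rfl]
        have := cnt_nonneg a' x; omega
      · rcases ih ha' hd o' ho' with ⟨t, ht, hle⟩
        refine ⟨t, List.mem_cons_of_mem _ ht, ?_⟩
        rw [cnt_cons_le a' (hxle t ht)]
        omega
  | case4 x a' y d' hxy ih =>
      intro o ho
      rcases List.pairwise_cons.mp hd with ⟨_, hd'⟩
      simp only [List.mem_map] at ho
      rcases ho with ⟨o', ho', rfl⟩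
      rcases ih ha hd' o' ho' with ⟨t, ht, hle⟩
      refine ⟨t, ht, ?_⟩
      have hxt : x ≤ t := by
        rcases List.mem_cons.mp ht with rfl | ht'
        · exact le_refl _
        · exact (List.pairwise_cons.mp ha).1 t ht'
      have hyt : y ≤ t := le_trans (by omega) hxt
      rw [cnt_cons_le d' hyt]
      omega

theorem offs_lower (a d : List Int) (ha : a.Pairwise (· ≤ ·)) :
    ∀ t ∈ a, ∃ o ∈ offs a d, cnt a t - cnt d t ≤ o := by
  fun_induction offs a d with
  | case1 d => simp
  | case2 x a' ih =>
      intro t ht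
      rcases List.pairwise_cons.mp ha with ⟨hxle, ha'⟩
      rcases List.mem_cons.mp ht with rfl | ht'
      · by_cases hx : t ∈ a'
        · rcases ih ha' t hx with ⟨o, ho, hle⟩
          refine ⟨o + 1, by simp only [List.mem_cons, List.mem_map]; exact Or.inr ⟨o, ho, rfl⟩, ?_⟩
          rw [cnt_cons_le a' le_rfl]
          rw [cnt_nil] at hle ⊢
          omega
        · refine ⟨1, List.mem_cons_self, ?_⟩
          have hc : cnt a' t = 0 := by
            apply cnt_eq_zero
            intro z hz
            rcases lt_or_eq_of_le (hxle z hz) with h | h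
            · exact h
            · exact absurd (h ▸ hz) hx
          rw [cnt_cons_le a' le_rfl, hc, cnt_nil]
          omega
      · rcases ih ha' t ht' with ⟨o, ho, hle⟩
        refine ⟨o + 1, by simp only [List.mem_cons, List.mem_map]; exact Or.inr ⟨o, ho, rfl⟩, ?_⟩
        rw [cnt_cons_le a' (hxle t ht')]
        rw [cnt_nil] at hle ⊢
        omega
  | case3 x a' y d' hxy ih =>
      intro t ht
      rcases List.pairwise_cons.mp ha with ⟨hxle, ha'⟩
      rcases List.mem_cons.mp ht with rfl | ht'
      · by_cases hx : t ∈ a'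
        · rcases ih ha' t hx with ⟨o, ho, hle⟩
          refine ⟨o + 1, by simp only [List.mem_cons, List.mem_map]; exact Or.inr ⟨o, ho, rfl⟩, ?_⟩
          rw [cnt_cons_le a' le_rfl]
          omega
        · refine ⟨1, List.mem_cons_self, ?_⟩
          have hc : cnt a' t = 0 := by
            apply cnt_eq_zero
            intro z hz
            rcases lt_or_eq_of_le (hxle z hz) with h | h
            · exact h
            · exact absurd (h ▸ hz) hx
          have := cnt_nonneg (y :: d') t
          rw [cnt_cons_le a' le_rfl, hc]
          omega
      · rcases ih ha' t ht' with ⟨o, ho, hle⟩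
        refine ⟨o + 1, by simp only [List.mem_cons, List.mem_map]; exact Or.inr ⟨o, ho, rfl⟩, ?_⟩
        rw [cnt_cons_le a' (hxle t ht')]
        omega
  | case4 x a' y d' hxy ih =>
      intro t ht
      rcases ih ha t ht with ⟨o, ho, hle⟩
      refine ⟨o - 1, by simp only [List.mem_map]; exact ⟨o, ho, rfl⟩, ?_⟩
      have hxt : x ≤ t := by
        rcases List.mem_cons.mp ht with rfl | ht'
        · exact le_refl _
        · exact (List.pairwise_cons.mp ha).1 t ht'
      have hyt : y ≤ t := le_trans (by omega) hxt
      rw [cnt_cons_le d' hyt]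
      omega


theorem cnt_perm {l l' : List Int} (h : l.Perm l') (t : Int) : cnt l t = cnt l' t := by
  unfold cnt
  rw [h.countP_eq]

theorem alt_eq_fold_max (arrival departure : List Int) :
    min_parking_spaces_alt arrival departure
      = (arrival.map (fun t => cnt arrival t - cnt departure t)).foldl max 0 := by
  unfold min_parking_spaces_alt
  rw [List.foldl_map]
  apply PySem.List.foldl_congr_mem
  intro best t _ht
  dsimp only
  rw [rank_eq _ _ (PySem.List.sorted_pairwise arrival (fun x => x)),
      rank_eq _ _ (PySem.List.sorted_pairwise departure (fun x => x)),
      cnt_perm (PySem.List.sorted_perm arrival (fun x => x) false),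
      cnt_perm (PySem.List.sorted_perm departure (fun x => x) false), max_def]
  split_ifs <;> omega

-- ===== VERDICT (by name: the statement is the Claim_ definition above) =====
theorem min_parking_spaces_spec : Claim_equal_min_parking_spaces := by
  intro arrival departure _hdom hpre
  show min_parking_spaces arrival departure = min_parking_spaces_alt arrival departure
  unfold min_parking_spaces
  set a := PySem.List.sorted arrival (fun x => x) false with hadef
  set d := PySem.List.sorted departure (fun x => x) false with hddef
  have ha : a.Pairwise (· ≤ ·) := PySem.List.sorted_pairwise arrival (fun x => x)
  have hd : d.Pairwise (· ≤ ·) := PySem.List.sorted_pairwise departure (fun x => x)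
  have hpa : a.Perm arrival := PySem.List.sorted_perm arrival (fun x => x) false
  have hpd : d.Perm departure := PySem.List.sorted_perm departure (fun x => x) false
  have h1 : minParkingLoop a d a.length 0 0 0 0 = listA a d a.length 0 0 := by
    have := loop_eq_listA a d 0 0 0 0
    simpa using this
  have h3 : a.length ≤ d.length ∨ ∃ y ∈ d, ∀ x ∈ a, x < y := by
    rcases hpre with h | ⟨y, hy, hall⟩
    · left; rw [hpa.length_eq, hpd.length_eq]; exact h
    · right
      exact ⟨y, (PySem.List.mem_sorted departure (fun x => x) false y).mpr hy,
        fun x hx => hall x ((PySem.List.mem_sorted arrival (fun x => x) false x).mp hx)⟩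
  have h2 : listA a d a.length 0 0
      = (offs a d).foldl (fun m o => max m (0 + o)) 0 :=
    listA_eq_offs a d a.length 0 0 le_rfl (by omega) h3
  have hz : (fun (m o : Int) => max m (0 + o)) = fun m o => max m o := by
    funext m o; rw [zero_add]
  rw [h1, h2, hz, alt_eq_fold_max]
  apply foldl_max_eq
  · intro o ho
    rcases offs_upper a d ha hd o ho with ⟨t, ht, hle⟩
    refine ⟨cnt arrival t - cnt departure t, List.mem_map.mpr ⟨t, hpa.mem_iff.mp ht, rfl⟩, ?_⟩
    rw [← cnt_perm hpa, ← cnt_perm hpd]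
    exact hle
  · intro v hv
    rcases List.mem_map.mp hv with ⟨t, ht, rfl⟩
    rcases offs_lower a d ha t (hpa.mem_iff.mpr ht) with ⟨o, ho, hle⟩
    refine ⟨o, ho, ?_⟩
    rw [← cnt_perm hpa, ← cnt_perm hpd]
    exact hle
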